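-- pv_equiv track=rewrite | github.com/Andrew0613/PSAVE | core/mnist/utils.py | set_hash
-- ===== SOURCE A (Python) =====
-- def set_hash(S):
--     s_hash, m = 0, len(S)
--     for i in range(m):
--         if S[i]:
--             s_hash = s_hash * 2 + 1
--         else:
--             s_hash = s_hash * 2
--     return s_hash
-- ===== SOURCE B (Python) =====
-- def set_hash(S):
--     m = len(S)
--     return sum(1 << (m - 1 - i) for i, b in enumerate(S) if b)
-- ===== Notes on version B (the rewrite author's own statement) =====
-- stated objective: alternative
-- what changed: Replaces the sequential double-and-add accumulator loop with a direct sum of independent positional weights 2**(m-1-i) over the truthy positions.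
import Mathlib
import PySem

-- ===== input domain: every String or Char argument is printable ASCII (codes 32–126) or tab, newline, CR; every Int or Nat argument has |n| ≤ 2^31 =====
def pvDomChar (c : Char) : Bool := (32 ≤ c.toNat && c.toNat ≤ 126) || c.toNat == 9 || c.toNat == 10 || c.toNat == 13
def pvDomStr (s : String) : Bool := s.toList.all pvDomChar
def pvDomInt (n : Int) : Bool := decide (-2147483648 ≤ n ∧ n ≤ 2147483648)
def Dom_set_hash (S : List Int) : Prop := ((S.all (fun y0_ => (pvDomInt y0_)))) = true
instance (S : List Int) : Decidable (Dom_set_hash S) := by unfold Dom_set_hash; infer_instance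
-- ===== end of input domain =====

-- B replaces A's sequential double-and-add accumulator by a direct sum of
-- independent positional weights 2^(m-1-i) over truthy positions (alternative, same cost).

-- ===== PORT A =====
-- the loop over range(m) reading S[i] is the left fold of the loop body over S
def set_hash (S : List Int) : Int :=
  S.foldl (fun s_hash b => if b ≠ 0 then s_hash * 2 + 1 else s_hash * 2) 0

-- ===== PORT B =====
-- sum(1 << (m-1-i) for i, b in enumerate(S) if b)
def set_hash_alt (S : List Int) : Int :=
  ((PySem.List.enumerate S 0).map
    (fun p => if p.2 ≠ 0 then (2:Int) ^ (((S.length : Int) - 1 - p.1).toNat) else 0)).sum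

-- ===== PRECONDITION & SPEC =====
def Spec_set_hash (S : List Int) (out : Int) : Prop := out = set_hash_alt S
instance (S : List Int) (out : Int) : Decidable (Spec_set_hash S out) := by unfold Spec_set_hash; infer_instance

-- ===== CLAIM (what is proved, stated in full; the proofs are below) =====
def Claim_equal_set_hash : Prop := ∀ (S : List Int), Dom_set_hash S → Spec_set_hash S (set_hash S)

-- ===== LEMMAS AND PROOFS =====

-- reference value: the big-endian bit value of the truthiness pattern of S
def pvBitval : List Int → Int
  | [] => 0
  | b :: t => (if b ≠ 0 then (2:Int) ^ t.length else 0) + pvBitval t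

theorem pvFoldl_eq (t : List Int) : ∀ (acc : Int),
    t.foldl (fun s_hash b => if b ≠ 0 then s_hash * 2 + 1 else s_hash * 2) acc
      = acc * 2 ^ t.length + pvBitval t := by
  induction t with
  | nil => intro acc; simp [pvBitval]
  | cons b t ih =>
      intro acc
      simp only [List.foldl_cons, ih, pvBitval, List.length_cons]
      split_ifs <;> ring

theorem pvEnum_sum (t : List Int) : ∀ (s n : Int), n = s + t.length →
    ((PySem.List.enumerate t s).map
      (fun p => if p.2 ≠ 0 then (2:Int) ^ ((n - 1 - p.1).toNat) else 0)).sum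
      = pvBitval t := by
  induction t with
  | nil => intro s n _; simp [PySem.List.enumerate_nil, pvBitval]
  | cons b t ih =>
      intro s n hn
      rw [PySem.List.enumerate_cons]
      simp only [List.map_cons, List.sum_cons, pvBitval]
      rw [ih (s + 1) n (by simp at hn ⊢; omega)]
      congr 1
      have : (n - 1 - s).toNat = t.length := by
        simp only [List.length_cons] at hn; omega
      rw [this]

-- ===== VERDICT (by name: the statement is the Claim_ definition above) =====
theorem set_hash_spec : Claim_equal_set_hash := by
  intro S _
  unfold Spec_set_hash set_hash set_hash_alt
  rw [pvFoldl_eq, pvEnum_sum S 0 S.length (by simp)]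
  ring
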